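-- pv_equiv track=rewrite | github.com/soo5717/2021-Algorithm-Study | Programmers/suyeon/52_week/전력망을 둘로 나누기.py | bfs
-- ===== SOURCE A (Python) =====
-- from collections import defaultdict, deque
--
-- def bfs(v1, v2, graph):
--     count = 1
--     queue = deque([v1])
--
--     visited = [False] * (len(graph) + 1)
--     visited[v1] = True
--     visited[v2] = True
--
--     while queue:
--         node = queue.popleft()
--
--         for n in graph[node]:
--             if not visited[n]:
--                 visited[n] = True
--                 queue.append(n)
--                 count += 1
--
--     return count
-- ===== SOURCE B (Python) =====
-- def bfs(v1, v2, graph):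
--     visited = [False] * (len(graph) + 1)
--     visited[v1] = True
--     visited[v2] = True
--
--     def dfs(node):
--         total = 1
--         for n in graph[node]:
--             if not visited[n]:
--                 visited[n] = True
--                 total += dfs(n)
--         return total
--
--     return dfs(v1)
-- ===== Notes on version B (the rewrite author's own statement) =====
-- stated objective: idiomatic
-- what changed: Replaces the deque-based breadth-first traversal (explicit queue, popleft, running count) with a recursive depth-first search that accumulates subtree totals; both mark v1 and v2 visited up front and count exactly the nodes reachable from v1, so the returned count is identical.
-- outside the precondition, e.g. on bfs(-3, -3, {-3: [2, -1], 2: []}): A returns 2, B returns 2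
import Mathlib
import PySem

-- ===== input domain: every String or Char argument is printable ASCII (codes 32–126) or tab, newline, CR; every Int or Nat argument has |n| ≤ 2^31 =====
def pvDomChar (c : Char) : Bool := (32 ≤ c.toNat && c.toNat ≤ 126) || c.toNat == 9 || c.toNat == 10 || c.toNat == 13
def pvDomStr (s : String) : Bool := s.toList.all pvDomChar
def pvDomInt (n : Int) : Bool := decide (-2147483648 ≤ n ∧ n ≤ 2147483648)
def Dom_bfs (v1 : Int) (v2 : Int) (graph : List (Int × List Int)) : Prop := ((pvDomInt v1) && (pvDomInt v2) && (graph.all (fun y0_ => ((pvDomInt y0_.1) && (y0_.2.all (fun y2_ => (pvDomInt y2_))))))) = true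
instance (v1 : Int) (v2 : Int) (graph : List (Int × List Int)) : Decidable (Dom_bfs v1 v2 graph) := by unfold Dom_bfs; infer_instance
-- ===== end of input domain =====

-- B re-implements the breadth-first count as a recursive depth-first search (same visited marks, same count); equivalence of the two traversals is proved below.

-- graph[node] (dict lookup; under Pre_ every expanded node is a key, so the [] default is never taken)
def pvAdj (graph : List (Int × List Int)) (node : Int) : List Int :=
  (PySem.Dict.mk graph).getD node []

-- ===== PORT A =====
-- the body of A's while-loop: 'for n in graph[node]: if not visited[n]: mark, append, count += 1'
def bfsExpand (visited : List Bool) (queue : List Int) (count : Int) :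
    List Int → List Bool × List Int × Int
  | [] => (visited, queue, count)
  | n :: ns =>
    if PySem.List.pyGet? visited n = some false then
      bfsExpand (PySem.List.pySetD visited n true) (queue ++ [n]) (count + 1) ns
    else
      bfsExpand visited queue count ns

-- 'while queue: node = queue.popleft(); …' (fuel only makes the loop total; it never runs out under Pre_)
def bfsLoop (graph : List (Int × List Int)) : Nat → List Bool → List Int → Int → Int
  | 0, _, _, count => count
  | _ + 1, _, [], count => count
  | fuel + 1, visited, node :: qs, count =>
    let s := bfsExpand visited qs count (pvAdj graph node)
    bfsLoop graph fuel s.1 s.2.1 s.2.2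

def bfs (v1 : Int) (v2 : Int) (graph : List (Int × List Int)) : Int :=
  let visited := PySem.List.pySetD (PySem.List.pySetD
    (List.replicate (graph.length + 1) false) v1 true) v2 true
  bfsLoop graph (graph.length + 3) visited [v1] 1

-- ===== PORT B =====
-- recursive 'dfs(node)' with its 'for n in graph[node]' loop (fuel only makes the recursion total; it never runs out under Pre_)
mutual
def dfsGo (graph : List (Int × List Int)) : Nat → List Bool → Int → List Bool × Int
  | 0, visited, _ => (visited, 1)
  | fuel + 1, visited, node => dfsNbrs graph fuel visited 1 (pvAdj graph node)
  termination_by fuel _ _ => (fuel, 0, 0)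

def dfsNbrs (graph : List (Int × List Int)) (fuel : Nat) :
    List Bool → Int → List Int → List Bool × Int
  | visited, total, [] => (visited, total)
  | visited, total, n :: ns =>
    if PySem.List.pyGet? visited n = some false then
      let r := dfsGo graph fuel (PySem.List.pySetD visited n true) n
      dfsNbrs graph fuel r.1 (total + r.2) ns
    else
      dfsNbrs graph fuel visited total ns
  termination_by _ _ ns => (fuel, 1, ns.length)
end

def bfs_alt (v1 : Int) (v2 : Int) (graph : List (Int × List Int)) : Int :=
  let visited := PySem.List.pySetD (PySem.List.pySetD
    (List.replicate (graph.length + 1) false) v1 true) v2 true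
  (dfsGo graph (graph.length + 2) visited v1).2

-- ===== PRECONDITION & SPEC =====
-- canonical cell of the visited array that Python index x addresses (negative x wraps)
abbrev pvCell (M : Nat) (x : Int) : Nat := (PySem.List.pyIdx? M x).getD 0
-- every label occurring in the graph (keys and neighbours)
abbrev pvU (graph : List (Int × List Int)) : List Int := graph.flatMap (fun p => p.1 :: p.2)
-- S (a set of keys) is closed under A's expansion step from v1 (cells of v1/v2 start visited)
abbrev pvClosedS (graph : List (Int × List Int)) (v1 v2 : Int) (M : Nat) (S : Finset Int) : Prop :=
  ∀ u ∈ insert v1 S, ∀ n ∈ pvAdj graph u, PySem.Raise.InRange M n →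
    pvCell M n ≠ pvCell M v1 → pvCell M n ≠ pvCell M v2 → n ∈ S
-- n lies in every expansion-closed key set, i.e. n gets enqueued by A
abbrev pvEmem (graph : List (Int × List Int)) (v1 v2 : Int) (M : Nat) (n : Int) : Prop :=
  ∀ S ∈ ((graph.map Prod.fst).toFinset).powerset, pvClosedS graph v1 v2 M S → n ∈ S
-- the labels of the graph that A enqueues (and then expands), as a computed list
abbrev pvE (graph : List (Int × List Int)) (v1 v2 : Int) (M : Nat) : List Int :=
  (pvU graph).filter (fun n => decide (pvEmem graph v1 v2 M n))

-- Pre_ is A's no-raise domain: keys unique (dict), v1/v2 and every index A touches in range of the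
-- visited array, every node A expands (v1 and the pvEmem labels) a key with in-range neighbours, and
-- no two distinct expanded labels alias one visited cell through Python's negative-index wrap (on such
-- aliasing inputs the visiting order decides which label is expanded, so A may return while a different
-- traversal raises or returns another count — a defensible corner excluded here; see the cites).
def Pre_bfs (v1 : Int) (v2 : Int) (graph : List (Int × List Int)) : Prop :=
  (graph.map Prod.fst).Nodup ∧
  PySem.Raise.InRange (graph.length + 1) v1 ∧
  PySem.Raise.InRange (graph.length + 1) v2 ∧
  v1 ∈ graph.map Prod.fst ∧
  (∀ n ∈ pvAdj graph v1, PySem.Raise.InRange (graph.length + 1) n) ∧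
  (∀ u ∈ pvE graph v1 v2 (graph.length + 1),
      u ∈ graph.map Prod.fst ∧ ∀ n ∈ pvAdj graph u, PySem.Raise.InRange (graph.length + 1) n) ∧
  (∀ x ∈ pvE graph v1 v2 (graph.length + 1), ∀ y ∈ pvE graph v1 v2 (graph.length + 1),
      pvCell (graph.length + 1) x = pvCell (graph.length + 1) y → x = y)
instance (v1 : Int) (v2 : Int) (graph : List (Int × List Int)) : Decidable (Pre_bfs v1 v2 graph) := by
  unfold Pre_bfs; infer_instance

def pvWitness_bfs : Int × Int × (List (Int × List Int)) := (0, 1, [(0, [1]), (1, [0])])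

def Spec_bfs (v1 : Int) (v2 : Int) (graph : List (Int × List Int)) (out : Int) : Prop := out = bfs_alt v1 v2 graph
instance (v1 : Int) (v2 : Int) (graph : List (Int × List Int)) (out : Int) : Decidable (Spec_bfs v1 v2 graph out) := by unfold Spec_bfs; infer_instance

-- ===== CLAIM (what is proved, stated in full; the proofs are below) =====
def Claim_equal_bfs : Prop := ∀ (v1 : Int) (v2 : Int) (graph : List (Int × List Int)), Dom_bfs v1 v2 graph → Pre_bfs v1 v2 graph → Spec_bfs v1 v2 graph (bfs v1 v2 graph)

-- ===== LEMMAS AND PROOFS =====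

-- nodes reachable from src by a nonempty path all of whose nodes after src are unvisited in V0
inductive pvReach (graph : List (Int × List Int)) (V0 : List Bool) (src : Int) : Int → Prop
  | base {n} : n ∈ pvAdj graph src → PySem.List.pyGet? V0 n = some false →
      pvReach graph V0 src n
  | step {m n} : pvReach graph V0 src m → n ∈ pvAdj graph m →
      PySem.List.pyGet? V0 n = some false → pvReach graph V0 src n

-- v1 itself or a node reachable from it: exactly the labels A may expand
def pvTouched (graph : List (Int × List Int)) (V0 : List Bool) (v1 u : Int) : Prop :=
  u = v1 ∨ pvReach graph V0 v1 u

def trueCount (V : List Bool) : Nat := V.countP id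

def falseCount (V : List Bool) : Nat := V.length - trueCount V

-- V is pointwise below W
def pvLe (V W : List Bool) : Prop := ∀ j : Nat, V.getD j false = true → W.getD j false = true

-- ---- small bridges between Python indexing and List.getD at the canonical cell ----

lemma inRange_of_pyGet? {α : Type} {V : List α} {x : Int} {b : α}
    (h : PySem.List.pyGet? V x = some b) : PySem.Raise.InRange V.length x := by
  by_contra hc
  rw [(PySem.List.pyGet?_eq_none_iff V x).mpr hc] at h
  simp at h

lemma pyIdx?_inRange {M : Nat} {x : Int} (h : PySem.Raise.InRange M x) :
    PySem.List.pyIdx? M x = some (pvCell M x) ∧ pvCell M x < M := by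
  obtain ⟨h1, h2⟩ := h
  unfold pvCell PySem.List.pyIdx?
  by_cases h0 : 0 ≤ x
  · rw [if_pos h0, if_pos h2]; exact ⟨rfl, by simp; omega⟩
  · rw [if_neg h0, if_pos h1]; exact ⟨rfl, by simp; omega⟩

lemma getD_of_pyGet? {V : List Bool} {x : Int} {b : Bool}
    (h : PySem.List.pyGet? V x = some b) :
    PySem.Raise.InRange V.length x ∧ pvCell V.length x < V.length ∧
      V.getD (pvCell V.length x) false = b := by
  have hir := inRange_of_pyGet? h
  obtain ⟨hidx, hlt⟩ := pyIdx?_inRange hir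
  refine ⟨hir, hlt, ?_⟩
  unfold PySem.List.pyGet? at h
  rw [hidx] at h
  simp only [Option.bind_some] at h
  rw [List.getElem?_eq_getElem hlt] at h
  rw [List.getD_eq_getElem _ _ hlt]
  exact (Option.some.injEq _ _).mp h

lemma pyGet?_of_getD {V : List Bool} {x : Int} (h : PySem.Raise.InRange V.length x) :
    PySem.List.pyGet? V x = some (V.getD (pvCell V.length x) false) := by
  obtain ⟨hidx, hlt⟩ := pyIdx?_inRange h
  unfold PySem.List.pyGet?
  rw [hidx]
  simp only [Option.bind_some]
  rw [List.getElem?_eq_getElem hlt, List.getD_eq_getElem _ _ hlt]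

lemma pySetD_cell {V : List Bool} {x : Int} (v : Bool) (h : PySem.Raise.InRange V.length x) :
    PySem.List.pySetD V x v = V.set (pvCell V.length x) v := by
  obtain ⟨hidx, _⟩ := pyIdx?_inRange h
  unfold PySem.List.pySetD PySem.List.pySet?
  rw [hidx]
  rfl

-- ---- counting lemmas ----

lemma trueCount_le_length (V : List Bool) : trueCount V ≤ V.length :=
  List.countP_le_length

lemma trueCount_set_true {V : List Bool} {j : Nat} (hlt : j < V.length)
    (hf : V.getD j false = false) : trueCount (V.set j true) = trueCount V + 1 := by
  induction V generalizing j with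
  | nil => simp at hlt
  | cons a V ih =>
    cases j with
    | zero =>
      simp [List.getD] at hf
      simp [trueCount, hf]
    | succ j =>
      simp at hlt
      simp [List.getD] at hf
      have := ih hlt hf
      simp [trueCount, List.countP_cons] at this ⊢
      omega

lemma getD_set_self {V : List Bool} {j : Nat} (hlt : j < V.length) :
    (V.set j true).getD j false = true := by
  rw [List.getD_eq_getElem _ _ (by simpa using hlt)]
  simp

lemma getD_set_ne {V : List Bool} {j k : Nat} (hne : j ≠ k) :
    (V.set j true).getD k false = V.getD k false := by
  by_cases hk : k < V.length
  · rw [List.getD_eq_getElem _ _ (by simpa using hk), List.getD_eq_getElem _ _ hk]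
    simp [List.getElem_set]
    intro h; omega
  · rw [List.getD_eq_default _ _ (by simpa using (by omega : V.length ≤ k)),
      List.getD_eq_default _ _ (by omega)]

lemma trueCount_le_of_pvLe : ∀ {V W : List Bool}, V.length = W.length → pvLe V W →
    trueCount V ≤ trueCount W := by
  intro V
  induction V with
  | nil => intro W _ _; simp [trueCount]
  | cons a V ih =>
    intro W hlen hle
    cases W with
    | nil => simp at hlen
    | cons b W =>
      have hhead : a = true → b = true := by
        intro ha; have := hle 0; simpa [List.getD, ha] using this
      have htail : trueCount V ≤ trueCount W := by
        refine ih (by simpa using hlen) ?_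
        intro j hj
        have := hle (j + 1); simpa [List.getD] using this hj
      simp only [trueCount, List.countP_cons] at *
      cases a with
      | false => simp; omega
      | true => simp [hhead rfl]; omega

lemma pvLe_refl (V : List Bool) : pvLe V V := fun _ h => h

lemma pvLe_trans {U V W : List Bool} (h1 : pvLe U V) (h2 : pvLe V W) : pvLe U W :=
  fun j h => h2 j (h1 j h)

lemma pvLe_set {V : List Bool} (j : Nat) : pvLe V (V.set j true) := by
  intro k hk
  by_cases hjk : j = k
  · subst hjk
    by_cases hlt : j < V.length
    · exact getD_set_self hlt
    · rw [List.getD_eq_default _ _ (by omega)] at hk; exact absurd hk (by simp)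
  · rw [getD_set_ne hjk]; exact hk

-- ---- pvAdj ----

lemma mem_pvAdj_elim {graph : List (Int × List Int)} {u n : Int}
    (h : n ∈ pvAdj graph u) : ∃ p ∈ graph, n ∈ p.2 := by
  unfold pvAdj at h
  rw [PySem.Dict.getD_eq_get?_getD] at h
  cases hg : (PySem.Dict.mk graph).get? u with
  | none => rw [hg] at h; simp at h
  | some v =>
    rw [hg] at h
    have := PySem.Dict.mem_items_of_get?_eq_some _ hg
    exact ⟨(u, v), this, h⟩

-- ---- pvReach facts ----

lemma pvReach_unvisited {graph : List (Int × List Int)} {V0 : List Bool} {src n : Int}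
    (h : pvReach graph V0 src n) : PySem.List.pyGet? V0 n = some false := by
  cases h with
  | base _ hv => exact hv
  | step _ _ hv => exact hv

lemma touched_step {graph : List (Int × List Int)} {V0 : List Bool} {v1 u n : Int}
    (hT : pvTouched graph V0 v1 u) (hn : n ∈ pvAdj graph u)
    (hv : PySem.List.pyGet? V0 n = some false) : pvReach graph V0 v1 n := by
  rcases hT with rfl | hT
  · exact pvReach.base hn hv
  · exact pvReach.step hT hn hv

lemma pvReach_anti {graph : List (Int × List Int)} {L : Nat} {V W : List Bool} {u j : Int}
    (hlenV : V.length = L) (hlenW : W.length = L) (hle : pvLe V W)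
    (h : pvReach graph W u j) : pvReach graph V u j := by
  have key : ∀ n : Int, PySem.List.pyGet? W n = some false → PySem.List.pyGet? V n = some false := by
    intro n hw
    obtain ⟨hir, hlt, hgd⟩ := getD_of_pyGet? hw
    rw [hlenW] at hir hlt hgd
    have hirV : PySem.Raise.InRange V.length n := by rw [hlenV]; exact hir
    have hf : V.getD (pvCell L n) false = false := by
      cases hvv : V.getD (pvCell L n) false
      · rfl
      · have := hle (pvCell L n) hvv
        rw [hgd] at this
        exact Bool.noConfusion this
    have := pyGet?_of_getD hirV
    rw [hlenV] at this
    rw [this, hf]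
  induction h with
  | base hmem hv => exact pvReach.base hmem (key _ hv)
  | step hr hmem hv ih => exact pvReach.step ih hmem (key _ hv)

lemma pvReach_comp {graph : List (Int × List Int)} {V : List Bool} {u m j : Int}
    (h1 : pvReach graph V u m) (h2 : pvReach graph V m j) : pvReach graph V u j := by
  induction h2 with
  | base hmem hv => exact pvReach.step h1 hmem hv
  | step _ hmem hv ih => exact pvReach.step ih hmem hv

-- ---- DFS (port B) specification ----

-- what one completed call dfsGo graph fuel V u guarantees
def pvGoP (graph : List (Int × List Int)) (L : Nat) (v1 : Int) (V0 : List Bool)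
    (fuel : Nat) (V : List Bool) (u : Int) : Prop :=
  (dfsGo graph fuel V u).1.length = V.length ∧
  pvLe V (dfsGo graph fuel V u).1 ∧
  ((dfsGo graph fuel V u).2 = 1 + (trueCount (dfsGo graph fuel V u).1 : Int) - (trueCount V : Int)) ∧
  (∀ j : Nat, j < L → (dfsGo graph fuel V u).1.getD j false = true →
      V.getD j false = true ∨ ∃ m, pvReach graph V u m ∧ pvCell L m = j) ∧
  (∀ n ∈ pvAdj graph u, (dfsGo graph fuel V u).1.getD (pvCell L n) false = true) ∧
  (∀ w : Int, pvReach graph V0 v1 w → (dfsGo graph fuel V u).1.getD (pvCell L w) false = true →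
      V.getD (pvCell L w) false = true ∨
      ∀ n ∈ pvAdj graph w, (dfsGo graph fuel V u).1.getD (pvCell L n) false = true)

-- what the neighbour loop dfsNbrs graph fuel V total ns guarantees (ns ⊆ adj u)
def pvNbrsP (graph : List (Int × List Int)) (L : Nat) (v1 : Int) (V0 : List Bool) (fuel : Nat)
    (V : List Bool) (total : Int) (u : Int) (ns : List Int) : Prop :=
  (dfsNbrs graph fuel V total ns).1.length = V.length ∧
  pvLe V (dfsNbrs graph fuel V total ns).1 ∧
  ((dfsNbrs graph fuel V total ns).2 =
      total + (trueCount (dfsNbrs graph fuel V total ns).1 : Int) - (trueCount V : Int)) ∧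
  (∀ j : Nat, j < L → (dfsNbrs graph fuel V total ns).1.getD j false = true →
      V.getD j false = true ∨ ∃ m, pvReach graph V u m ∧ pvCell L m = j) ∧
  (∀ n ∈ ns, (dfsNbrs graph fuel V total ns).1.getD (pvCell L n) false = true) ∧
  (∀ w : Int, pvReach graph V0 v1 w →
      (dfsNbrs graph fuel V total ns).1.getD (pvCell L w) false = true →
      V.getD (pvCell L w) false = true ∨
      ∀ n ∈ pvAdj graph w, (dfsNbrs graph fuel V total ns).1.getD (pvCell L n) false = true)

lemma dfsNbrs_spec (graph : List (Int × List Int)) (L : Nat) (v1 : Int) (V0 : List Bool)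
    (hV0len : V0.length = L)
    (HTv : ∀ u n, pvTouched graph V0 v1 u → n ∈ pvAdj graph u → PySem.Raise.InRange L n)
    (NC : ∀ x y, pvReach graph V0 v1 x → pvReach graph V0 v1 y →
        pvCell L x = pvCell L y → x = y)
    (fuel : Nat)
    (IH : ∀ V u, V.length = L → falseCount V < fuel → pvLe V0 V →
        pvTouched graph V0 v1 u → pvGoP graph L v1 V0 fuel V u) :
    ∀ ns V (total : Int) (u : Int), (∀ n ∈ ns, n ∈ pvAdj graph u) → V.length = L →
      falseCount V ≤ fuel → pvLe V0 V → pvTouched graph V0 v1 u →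
      pvNbrsP graph L v1 V0 fuel V total u ns := by
  intro ns
  induction ns with
  | nil =>
    intro V total u _ hlen _ _ _
    unfold pvNbrsP
    simp only [dfsNbrs]
    refine ⟨?_, ?_, ?_, ?_, ?_, ?_⟩
    · trivial
    · exact pvLe_refl V
    · ring
    · exact fun j _ h => Or.inl h
    · simp
    · exact fun w _ h => Or.inl h
  | cons n ns ih =>
    intro V total u hsub hlen hfc hle0 hu
    have hn : n ∈ pvAdj graph u := hsub n (List.mem_cons_self)
    by_cases hvis : PySem.List.pyGet? V n = some false
    · obtain ⟨hir, hlt, hgd⟩ := getD_of_pyGet? hvis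
      rw [hlen] at hir hlt hgd
      have hstep : dfsNbrs graph fuel V total (n :: ns) =
          dfsNbrs graph fuel (dfsGo graph fuel (PySem.List.pySetD V n true) n).1
            (total + (dfsGo graph fuel (PySem.List.pySetD V n true) n).2) ns := by
        rw [dfsNbrs, if_pos hvis]
      have hV1 : PySem.List.pySetD V n true = V.set (pvCell L n) true := by
        have := pySetD_cell true (by rw [hlen]; exact hir)
        rwa [hlen] at this
      have hlen1 : (PySem.List.pySetD V n true).length = L := by rw [hV1]; simpa using hlen
      have htc1 : trueCount (PySem.List.pySetD V n true) = trueCount V + 1 := by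
        rw [hV1]; exact trueCount_set_true (by rw [hlen]; exact hlt) hgd
      have hfc1 : falseCount (PySem.List.pySetD V n true) < fuel := by
        have h1 : falseCount V ≥ 1 := by
          unfold falseCount
          have h2 : trueCount V + 1 ≤ L := by rw [← htc1, ← hlen1]; exact trueCount_le_length _
          rw [hlen]; omega
        unfold falseCount at *
        rw [hlen1, htc1, hlen] at *
        omega
      have hleV1 : pvLe V (PySem.List.pySetD V n true) := by rw [hV1]; exact pvLe_set (pvCell L n)
      -- n's cell is unvisited in V0, so n is reachable
      have hV0n : PySem.List.pyGet? V0 n = some false := by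
        have hir0 : PySem.Raise.InRange V0.length n := by rw [hV0len]; exact hir
        have hf : V0.getD (pvCell L n) false = false := by
          cases h0 : V0.getD (pvCell L n) false
          · rfl
          · have := hle0 _ h0
            rw [hgd] at this; exact Bool.noConfusion this
        have := pyGet?_of_getD hir0
        rw [hV0len] at this
        rw [this, hf]
      have hreachn : pvReach graph V0 v1 n := touched_step hu hn hV0n
      have hrel : pvReach graph V u n := pvReach.base hn hvis
      obtain ⟨g1len, g1le, g1cnt, g1snd, g1adj, g1cls⟩ :=
        IH _ n hlen1 hfc1 (pvLe_trans hle0 hleV1) (Or.inr hreachn)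
      have hlenr1 : (dfsGo graph fuel (PySem.List.pySetD V n true) n).1.length = L := by
        rw [g1len]; exact hlen1
      have hfcr1 : falseCount (dfsGo graph fuel (PySem.List.pySetD V n true) n).1 ≤ fuel := by
        have := trueCount_le_of_pvLe (by rw [g1len]) g1le
        unfold falseCount at *
        rw [hlenr1, hlen1] at *
        omega
      have hleV_r1 : pvLe V (dfsGo graph fuel (PySem.List.pySetD V n true) n).1 :=
        pvLe_trans hleV1 g1le
      obtain ⟨r2len, r2le, r2cnt, r2snd, r2mk, r2cls⟩ :=
        ih (dfsGo graph fuel (PySem.List.pySetD V n true) n).1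
          (total + (dfsGo graph fuel (PySem.List.pySetD V n true) n).2) u
          (fun m hm => hsub m (List.mem_cons_of_mem _ hm)) hlenr1 hfcr1
          (pvLe_trans hle0 hleV_r1) hu
      have hjn : ∀ j : Nat, V.getD j false = false →
          (PySem.List.pySetD V n true).getD j false = true → j = pvCell L n := by
        intro j hVj hV1j
        by_contra hne
        rw [hV1, getD_set_ne (fun h => hne h.symm)] at hV1j
        rw [hVj] at hV1j; exact Bool.noConfusion hV1j
      unfold pvNbrsP
      rw [hstep]
      refine ⟨by rw [r2len, hlenr1, hlen], pvLe_trans hleV_r1 r2le, ?_, ?_, ?_, ?_⟩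
      · rw [r2cnt, g1cnt, htc1]; push_cast; ring
      · -- soundness
        intro j hj hmark
        by_cases hVj : V.getD j false = true
        · exact Or.inl hVj
        · right
          have hVjf : V.getD j false = false := by
            cases h : V.getD j false
            · rfl
            · exact absurd h hVj
          rcases r2snd j hj hmark with h1 | h1
          · rcases g1snd j hj h1 with h2 | h2
            · exact ⟨n, hrel, (hjn j hVjf h2).symm⟩
            · obtain ⟨m, hm, hmc⟩ := h2
              have h3 : pvReach graph V n m := pvReach_anti hlen hlen1 hleV1 hm
              exact ⟨m, pvReach_comp hrel h3, hmc⟩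
          · obtain ⟨m, hm, hmc⟩ := h1
            exact ⟨m, pvReach_anti hlen hlenr1 hleV_r1 hm, hmc⟩
      · -- all of n :: ns marked at the end
        intro m hm
        rcases List.mem_cons.mp hm with rfl | hm
        · have h1 : (PySem.List.pySetD V m true).getD (pvCell L m) false = true := by
            rw [hV1]; exact getD_set_self (by rw [hlen]; exact hlt)
          exact r2le _ (g1le _ h1)
        · exact r2mk m hm
      · -- closedness of newly marked labels
        intro w hw hmark
        by_cases hVw : V.getD (pvCell L w) false = true
        · exact Or.inl hVw
        · right
          have hVwf : V.getD (pvCell L w) false = false := by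
            cases h : V.getD (pvCell L w) false
            · rfl
            · exact absurd h hVw
          rcases r2cls w hw hmark with h1 | h1
          · rcases g1cls w hw h1 with h2 | h2
            · -- w's cell was already set when entering dfsGo on n: w aliases n, so w = n
              have hcc := hjn (pvCell L w) hVwf h2
              have hwn : w = n := NC w n hw hreachn hcc
              subst hwn
              exact fun m hm => r2le _ (g1adj m hm)
            · exact fun m hm => r2le _ (h2 m hm)
          · exact h1
    · -- neighbour's cell already visited: skip
      have hstep : dfsNbrs graph fuel V total (n :: ns) = dfsNbrs graph fuel V total ns := by
        rw [dfsNbrs, if_neg hvis]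
      have hbn : PySem.Raise.InRange L n := HTv u n hu hn
      have hmarked : V.getD (pvCell L n) false = true := by
        have := pyGet?_of_getD (x := n) (V := V) (by rw [hlen]; exact hbn)
        rw [hlen] at this
        cases h : V.getD (pvCell L n) false
        · rw [h] at this; exact absurd this hvis
        · rfl
      obtain ⟨r2len, r2le, r2cnt, r2snd, r2mk, r2cls⟩ :=
        ih V total u (fun m hm => hsub m (List.mem_cons_of_mem _ hm)) hlen hfc hle0 hu
      unfold pvNbrsP
      rw [hstep]
      refine ⟨r2len, r2le, r2cnt, r2snd, ?_, r2cls⟩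
      intro m hm
      rcases List.mem_cons.mp hm with rfl | hm
      · exact r2le _ hmarked
      · exact r2mk m hm

lemma dfsGo_spec (graph : List (Int × List Int)) (L : Nat) (v1 : Int) (V0 : List Bool)
    (hV0len : V0.length = L)
    (HTv : ∀ u n, pvTouched graph V0 v1 u → n ∈ pvAdj graph u → PySem.Raise.InRange L n)
    (NC : ∀ x y, pvReach graph V0 v1 x → pvReach graph V0 v1 y →
        pvCell L x = pvCell L y → x = y) :
    ∀ (fuel : Nat) (V : List Bool) (u : Int), V.length = L → falseCount V < fuel →
      pvLe V0 V → pvTouched graph V0 v1 u → pvGoP graph L v1 V0 fuel V u := by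
  intro fuel
  induction fuel with
  | zero => intro V u _ hf; omega
  | succ fuel ih =>
    intro V u hlen hf hle0 hu
    have hN := dfsNbrs_spec graph L v1 V0 hV0len HTv NC fuel ih (pvAdj graph u) V 1 u
      (fun _ h => h) hlen (by omega) hle0 hu
    obtain ⟨h1, h2, h3, h4, h5, h6⟩ := hN
    have hgo : dfsGo graph (fuel + 1) V u = dfsNbrs graph fuel V 1 (pvAdj graph u) := by
      rw [dfsGo]
    exact ⟨by rw [hgo]; exact h1, by rw [hgo]; exact h2, by rw [hgo]; exact h3,
      by rw [hgo]; exact h4, by rw [hgo]; exact h5, by rw [hgo]; exact h6⟩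

-- ---- BFS (port A) specification ----

-- loop invariant of A's while-loop
def pvInv (graph : List (Int × List Int)) (L : Nat) (v1 : Int) (V0 : List Bool)
    (V : List Bool) (Q : List Int) (c : Int) : Prop :=
  V.length = L ∧
  pvLe V0 V ∧
  (∀ j : Nat, j < L → V.getD j false = true →
      V0.getD j false = true ∨ ∃ m, pvReach graph V0 v1 m ∧ pvCell L m = j) ∧
  (∀ u ∈ Q, V.getD (pvCell L u) false = true ∧ pvTouched graph V0 v1 u) ∧
  Q.Nodup ∧
  (∀ u : Int, pvReach graph V0 v1 u → V.getD (pvCell L u) false = true → u ∉ Q →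
      ∀ n ∈ pvAdj graph u, V.getD (pvCell L n) false = true) ∧
  (v1 ∉ Q → ∀ n ∈ pvAdj graph v1, V.getD (pvCell L n) false = true) ∧
  c = 1 + (trueCount V : Int) - (trueCount V0 : Int)

lemma bfsExpand_spec (graph : List (Int × List Int)) (L : Nat) (v1 : Int) (V0 : List Bool)
    (hV0len : V0.length = L)
    (HTv : ∀ u n, pvTouched graph V0 v1 u → n ∈ pvAdj graph u → PySem.Raise.InRange L n)
    (NC : ∀ x y, pvReach graph V0 v1 x → pvReach graph V0 v1 y →
        pvCell L x = pvCell L y → x = y) :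
    ∀ (ns : List Int) (V : List Bool) (Q : List Int) (c u : Int),
      (∀ n ∈ ns, n ∈ pvAdj graph u) →
      pvTouched graph V0 v1 u →
      V.length = L →
      pvLe V0 V →
      (∀ j : Nat, j < L → V.getD j false = true →
          V0.getD j false = true ∨ ∃ m, pvReach graph V0 v1 m ∧ pvCell L m = j) →
      (∀ w ∈ Q, V.getD (pvCell L w) false = true ∧ pvTouched graph V0 v1 w) →
      Q.Nodup →
      (bfsExpand V Q c ns).1.length = L ∧
      pvLe V (bfsExpand V Q c ns).1 ∧
      pvLe V0 (bfsExpand V Q c ns).1 ∧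
      (∀ j : Nat, j < L → (bfsExpand V Q c ns).1.getD j false = true →
          V0.getD j false = true ∨ ∃ m, pvReach graph V0 v1 m ∧ pvCell L m = j) ∧
      (∀ w ∈ (bfsExpand V Q c ns).2.1,
          (bfsExpand V Q c ns).1.getD (pvCell L w) false = true ∧ pvTouched graph V0 v1 w) ∧
      (bfsExpand V Q c ns).2.1.Nodup ∧
      (∀ w ∈ Q, w ∈ (bfsExpand V Q c ns).2.1) ∧
      (∀ w : Int, V.getD (pvCell L w) false = true → w ∉ Q → w ∉ (bfsExpand V Q c ns).2.1) ∧
      (∀ w : Int, pvReach graph V0 v1 w → (bfsExpand V Q c ns).1.getD (pvCell L w) false = true →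
          V.getD (pvCell L w) false = true ∨ w ∈ (bfsExpand V Q c ns).2.1) ∧
      (∀ n ∈ ns, (bfsExpand V Q c ns).1.getD (pvCell L n) false = true) ∧
      ((bfsExpand V Q c ns).2.2 = c + (trueCount (bfsExpand V Q c ns).1 : Int) - (trueCount V : Int)) ∧
      falseCount (bfsExpand V Q c ns).1 + (bfsExpand V Q c ns).2.1.length ≤ falseCount V + Q.length := by
  intro ns
  induction ns with
  | nil =>
    intro V Q c u _ _ hlen hle0 hsnd hQ hnd
    simp only [bfsExpand]
    exact ⟨hlen, pvLe_refl V, hle0, hsnd, hQ, hnd, fun w hw => hw,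
      fun w _ hw => hw, fun w _ h => Or.inl h, by simp, by ring, le_refl _⟩
  | cons n ns ih =>
    intro V Q c u hsub hu hlen hle0 hsnd hQ hnd
    have hn : n ∈ pvAdj graph u := hsub n (List.mem_cons_self)
    by_cases hvis : PySem.List.pyGet? V n = some false
    · obtain ⟨hir, hlt, hgd⟩ := getD_of_pyGet? hvis
      rw [hlen] at hir hlt hgd
      have hstep : bfsExpand V Q c (n :: ns) =
          bfsExpand (PySem.List.pySetD V n true) (Q ++ [n]) (c + 1) ns := by
        rw [bfsExpand, if_pos hvis]
      have hV1 : PySem.List.pySetD V n true = V.set (pvCell L n) true := by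
        have := pySetD_cell true (by rw [hlen]; exact hir)
        rwa [hlen] at this
      have hlen1 : (PySem.List.pySetD V n true).length = L := by rw [hV1]; simpa using hlen
      have htc1 : trueCount (PySem.List.pySetD V n true) = trueCount V + 1 := by
        rw [hV1]; exact trueCount_set_true (by rw [hlen]; exact hlt) hgd
      have hleV1 : pvLe V (PySem.List.pySetD V n true) := by rw [hV1]; exact pvLe_set (pvCell L n)
      -- n's cell is unvisited in V0, so n is newly reachable
      have hV0n : PySem.List.pyGet? V0 n = some false := by
        have hir0 : PySem.Raise.InRange V0.length n := by rw [hV0len]; exact hir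
        have hf : V0.getD (pvCell L n) false = false := by
          cases h0 : V0.getD (pvCell L n) false
          · rfl
          · have := hle0 _ h0
            rw [hgd] at this; exact Bool.noConfusion this
        have := pyGet?_of_getD hir0
        rw [hV0len] at this
        rw [this, hf]
      have hreachn : pvReach graph V0 v1 n := touched_step hu hn hV0n
      -- n not already in the queue (its cell is still unvisited)
      have hnotinQ : n ∉ Q := by
        intro hmem
        have := (hQ n hmem).1
        rw [hgd] at this; exact Bool.noConfusion this
      have hjn : ∀ j : Nat, V.getD j false = false →
          (PySem.List.pySetD V n true).getD j false = true → j = pvCell L n := by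
        intro j hVj hV1j
        by_contra hne
        rw [hV1, getD_set_ne (fun h => hne h.symm)] at hV1j
        rw [hVj] at hV1j; exact Bool.noConfusion hV1j
      have hQ1 : ∀ w ∈ Q ++ [n], (PySem.List.pySetD V n true).getD (pvCell L w) false = true ∧
          pvTouched graph V0 v1 w := by
        intro w hw
        rcases List.mem_append.mp hw with hw | hw
        · obtain ⟨h1, h2⟩ := hQ w hw
          exact ⟨hleV1 _ h1, h2⟩
        · rcases List.mem_singleton.mp hw with rfl
          exact ⟨by rw [hV1]; exact getD_set_self (by rw [hlen]; exact hlt), Or.inr hreachn⟩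
      have hnd1 : (Q ++ [n]).Nodup := by
        simp only [List.nodup_append]
        refine ⟨hnd, by simp, ?_⟩
        intro a ha b hb
        rcases List.mem_singleton.mp hb with rfl
        exact fun h => hnotinQ (h ▸ ha)
      have hsnd1 : ∀ j : Nat, j < L → (PySem.List.pySetD V n true).getD j false = true →
          V0.getD j false = true ∨ ∃ m, pvReach graph V0 v1 m ∧ pvCell L m = j := by
        intro j hj hmark
        by_cases hVj : V.getD j false = true
        · exact hsnd j hj hVj
        · have hVjf : V.getD j false = false := by
            cases h : V.getD j false
            · rfl
            · exact absurd h hVj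
          exact Or.inr ⟨n, hreachn, (hjn j hVjf hmark).symm⟩
      obtain ⟨e1, e2, e3, e4, e5, e6, e7, e8, e9, e10, e11, e12⟩ :=
        ih (PySem.List.pySetD V n true) (Q ++ [n]) (c + 1) u
          (fun m hm => hsub m (List.mem_cons_of_mem _ hm)) hu hlen1 (pvLe_trans hle0 hleV1)
          hsnd1 hQ1 hnd1
      rw [hstep]
      refine ⟨e1, pvLe_trans hleV1 e2, e3, e4, e5, e6, ?_, ?_, ?_, ?_, ?_, ?_⟩
      · exact fun w hw => e7 w (List.mem_append.mpr (Or.inl hw))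
      · -- already-marked labels outside the queue stay outside
        intro w hwmark hwQ
        refine e8 w (hleV1 _ hwmark) ?_
        intro hmem
        rcases List.mem_append.mp hmem with h | h
        · exact hwQ h
        · rcases List.mem_singleton.mp h with rfl
          rw [hgd] at hwmark; exact Bool.noConfusion hwmark
      · -- labels whose cell is marked during the expansion are queued
        intro w hw hwmark
        by_cases hVw : V.getD (pvCell L w) false = true
        · exact Or.inl hVw
        · have hVwf : V.getD (pvCell L w) false = false := by
            cases h : V.getD (pvCell L w) false
            · rfl
            · exact absurd h hVw
          rcases e9 w hw hwmark with h1 | h1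
          · have hcc := hjn (pvCell L w) hVwf h1
            have hwn : w = n := NC w n hw hreachn hcc
            subst hwn
            exact Or.inr (e7 w (List.mem_append.mpr (Or.inr (List.mem_singleton.mpr rfl))))
          · exact Or.inr h1
      · intro m hm
        rcases List.mem_cons.mp hm with rfl | hm
        · exact e2 _ (by rw [hV1]; exact getD_set_self (by rw [hlen]; exact hlt))
        · exact e10 m hm
      · rw [e11, htc1]; push_cast; ring
      · have hdec : falseCount (PySem.List.pySetD V n true) + 1 = falseCount V := by
          unfold falseCount
          rw [hlen1, htc1, hlen]
          have h2 : trueCount V + 1 ≤ L := by rw [← htc1, ← hlen1]; exact trueCount_le_length _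
          omega
        calc falseCount (bfsExpand (PySem.List.pySetD V n true) (Q ++ [n]) (c + 1) ns).1 +
              (bfsExpand (PySem.List.pySetD V n true) (Q ++ [n]) (c + 1) ns).2.1.length
            ≤ falseCount (PySem.List.pySetD V n true) + (Q ++ [n]).length := e12
          _ = falseCount V + Q.length := by simp [← hdec]; omega
    · have hstep : bfsExpand V Q c (n :: ns) = bfsExpand V Q c ns := by
        rw [bfsExpand, if_neg hvis]
      have hbn : PySem.Raise.InRange L n := HTv u n hu hn
      have hmarked : V.getD (pvCell L n) false = true := by
        have := pyGet?_of_getD (x := n) (V := V) (by rw [hlen]; exact hbn)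
        rw [hlen] at this
        cases h : V.getD (pvCell L n) false
        · rw [h] at this; exact absurd this hvis
        · rfl
      obtain ⟨e1, e2, e3, e4, e5, e6, e7, e8, e9, e10, e11, e12⟩ :=
        ih V Q c u (fun m hm => hsub m (List.mem_cons_of_mem _ hm)) hu hlen hle0 hsnd hQ hnd
      rw [hstep]
      refine ⟨e1, e2, e3, e4, e5, e6, e7, e8, e9, ?_, e11, e12⟩
      intro m hm
      rcases List.mem_cons.mp hm with rfl | hm
      · exact e2 _ hmarked
      · exact e10 m hm

-- every reachable node's cell is marked once the queue has drained
lemma pvComplete (graph : List (Int × List Int)) (L : Nat) (v1 : Int) (V0 V : List Bool)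
    (hclosedR : ∀ u : Int, pvReach graph V0 v1 u → V.getD (pvCell L u) false = true →
        ∀ n ∈ pvAdj graph u, V.getD (pvCell L n) false = true)
    (hclosedV1 : ∀ n ∈ pvAdj graph v1, V.getD (pvCell L n) false = true) :
    ∀ m : Int, pvReach graph V0 v1 m → V.getD (pvCell L m) false = true := by
  intro m hm
  induction hm with
  | base hmem _ => exact hclosedV1 _ hmem
  | @step m' n' hr hmem hunv ih => exact hclosedR m' hr ih _ hmem

lemma bfsLoop_spec (graph : List (Int × List Int)) (L : Nat) (v1 : Int) (V0 VF : List Bool)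
    (hV0len : V0.length = L)
    (HTv : ∀ u n, pvTouched graph V0 v1 u → n ∈ pvAdj graph u → PySem.Raise.InRange L n)
    (NC : ∀ x y, pvReach graph V0 v1 x → pvReach graph V0 v1 y →
        pvCell L x = pvCell L y → x = y)
    (HFlen : VF.length = L)
    (HFchar : ∀ j : Nat, j < L → (VF.getD j false = true ↔
        V0.getD j false = true ∨ ∃ m, pvReach graph V0 v1 m ∧ pvCell L m = j)) :
    ∀ (fuel : Nat) (V : List Bool) (Q : List Int) (c : Int),
      pvInv graph L v1 V0 V Q c → falseCount V + Q.length < fuel →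
      bfsLoop graph fuel V Q c = 1 + (trueCount VF : Int) - (trueCount V0 : Int) := by
  intro fuel
  induction fuel with
  | zero => intro V Q c _ hf; omega
  | succ fuel ih =>
    intro V Q c hinv hf
    obtain ⟨hlen, hle0, hsnd, hQ, hnd, hclsR, hclsV1, hc⟩ := hinv
    cases Q with
    | nil =>
      simp only [bfsLoop]
      have hVF : V = VF := by
        apply List.ext_getElem (by rw [hlen, HFlen])
        intro j hj hj'
        have hjL : j < L := by rw [← hlen]; exact hj
        have h1 : V.getD j false = V[j] := List.getD_eq_getElem V false hj
        have h2 : VF.getD j false = VF[j] := List.getD_eq_getElem VF false hj'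
        have hiff : V.getD j false = true ↔ VF.getD j false = true := by
          rw [HFchar j hjL]
          constructor
          · exact hsnd j hjL
          · rintro (h | h)
            · exact hle0 j h
            · obtain ⟨m, hm, hmc⟩ := h
              have := pvComplete graph L v1 V0 V
                (fun u h1 h2 => hclsR u h1 h2 (List.not_mem_nil))
                (hclsV1 (List.not_mem_nil)) m hm
              rwa [hmc] at this
        rw [← h1, ← h2, Bool.eq_iff_iff]
        exact hiff
      rw [hc, hVF]
    | cons u qs =>
      have hu := hQ u (List.mem_cons_self)
      obtain ⟨e1, e2, e3, e4, e5, e6, e7, e8, e9, e10, e11, e12⟩ :=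
        bfsExpand_spec graph L v1 V0 hV0len HTv NC (pvAdj graph u) V qs c u
          (fun _ h => h) hu.2 hlen hle0 hsnd
          (fun w hw => hQ w (List.mem_cons_of_mem _ hw)) (List.Nodup.of_cons hnd)
      have hstep : bfsLoop graph (fuel + 1) V (u :: qs) c =
          bfsLoop graph fuel (bfsExpand V qs c (pvAdj graph u)).1
            (bfsExpand V qs c (pvAdj graph u)).2.1 (bfsExpand V qs c (pvAdj graph u)).2.2 := by
        rw [bfsLoop]
      rw [hstep]
      have hinv' : pvInv graph L v1 V0 (bfsExpand V qs c (pvAdj graph u)).1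
          (bfsExpand V qs c (pvAdj graph u)).2.1 (bfsExpand V qs c (pvAdj graph u)).2.2 := by
        refine ⟨e1, e3, e4, e5, e6, ?_, ?_, by rw [e11, hc]; ring⟩
        · -- closedness for reachable labels
          intro w hw hwmark hwnotin
          by_cases hVw : V.getD (pvCell L w) false = true
          · by_cases hwu : w = u
            · subst hwu
              exact fun n hn => e10 n hn
            · have hwq : w ∉ qs := fun h => hwnotin (e7 w h)
              have hwQ : w ∉ u :: qs := by
                intro h
                rcases List.mem_cons.mp h with h | h
                · exact hwu h
                · exact hwq h
              exact fun n hn => e2 _ (hclsR w hw hVw hwQ n hn)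
          · rcases e9 w hw hwmark with h1 | h1
            · exact absurd h1 hVw
            · exact absurd h1 hwnotin
        · -- closedness for v1
          intro hv1notin
          by_cases hv1u : v1 = u
          · subst hv1u
            exact fun n hn => e10 n hn
          · have hv1q : v1 ∉ qs := fun h => hv1notin (e7 v1 h)
            have hv1Q : v1 ∉ u :: qs := by
              intro h
              rcases List.mem_cons.mp h with h | h
              · exact hv1u h
              · exact hv1q h
            exact fun n hn => e2 _ (hclsV1 hv1Q n hn)
      refine ih _ _ _ hinv' ?_
      have : qs.length + 1 = (u :: qs).length := rfl
      omega

-- ---- from Pre_ to the traversal hypotheses ----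

lemma reach_Emem (graph : List (Int × List Int)) (v1 v2 : Int) (L : Nat) (V0 : List Bool)
    (hV0len : V0.length = L)
    (hV0v1 : V0.getD (pvCell L v1) false = true)
    (hV0v2 : V0.getD (pvCell L v2) false = true) :
    ∀ n : Int, pvReach graph V0 v1 n → n ∈ pvE graph v1 v2 L := by
  have hstep : ∀ u n : Int, n ∈ pvAdj graph u → PySem.List.pyGet? V0 n = some false →
      ∀ S ∈ ((graph.map Prod.fst).toFinset).powerset, pvClosedS graph v1 v2 L S →
      u ∈ insert v1 S → n ∈ S := by
    intro u n hmem hunv S hS hcl hu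
    obtain ⟨hir, hlt, hgd⟩ := getD_of_pyGet? hunv
    rw [hV0len] at hir hlt hgd
    refine hcl u hu n hmem hir ?_ ?_
    · intro hc
      rw [hc, hV0v1] at hgd; exact Bool.noConfusion hgd
    · intro hc
      rw [hc, hV0v2] at hgd; exact Bool.noConfusion hgd
  have hU : ∀ u n : Int, n ∈ pvAdj graph u → n ∈ pvU graph := by
    intro u n hmem
    obtain ⟨p, hp, hnp⟩ := mem_pvAdj_elim hmem
    exact List.mem_flatMap.mpr ⟨p, hp, List.mem_cons_of_mem _ hnp⟩
  have hmemE : ∀ n : Int, n ∈ pvU graph → pvEmem graph v1 v2 L n → n ∈ pvE graph v1 v2 L := by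
    intro n h1 h2
    exact List.mem_filter.mpr ⟨h1, decide_eq_true h2⟩
  have hEmem : ∀ n : Int, n ∈ pvE graph v1 v2 L → pvEmem graph v1 v2 L n := by
    intro n h1
    exact of_decide_eq_true (List.mem_filter.mp h1).2
  intro n hn
  induction hn with
  | @base n hmem hunv =>
    refine hmemE _ (hU _ _ hmem) ?_
    intro S hS hcl
    exact hstep v1 n hmem hunv S hS hcl (Finset.mem_insert_self _ _)
  | @step m n hr hmem hunv ih =>
    refine hmemE _ (hU _ _ hmem) ?_
    intro S hS hcl
    exact hstep m n hmem hunv S hS hcl (Finset.mem_insert_of_mem (hEmem _ ih S hS hcl))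

-- ===== VERDICT (by name: the statement is the Claim_ definition above) =====
theorem bfs_spec : Claim_equal_bfs := by
  intro v1 v2 graph _ hpre
  unfold Spec_bfs bfs bfs_alt
  obtain ⟨hnd, h1r, h2r, h1k, hv1adj, hEprop, hNC⟩ := hpre
  set L := graph.length + 1 with hL
  show bfsLoop graph (graph.length + 3)
      (PySem.List.pySetD (PySem.List.pySetD (List.replicate (graph.length + 1) false) v1 true) v2 true)
      [v1] 1 =
    (dfsGo graph (graph.length + 2)
      (PySem.List.pySetD (PySem.List.pySetD (List.replicate (graph.length + 1) false) v1 true) v2 true) v1).2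
  set V0 := PySem.List.pySetD (PySem.List.pySetD (List.replicate (graph.length + 1) false) v1 true) v2 true
    with hV0def
  have hrep : (List.replicate (graph.length + 1) false).length = L := by simp [hL]
  have hA : PySem.List.pySetD (List.replicate (graph.length + 1) false) v1 true
      = (List.replicate (graph.length + 1) false).set (pvCell L v1) true := by
    have := pySetD_cell (V := List.replicate (graph.length + 1) false) (x := v1) true
      (by rw [hrep]; exact h1r)
    rwa [hrep] at this
  have hAlen : (PySem.List.pySetD (List.replicate (graph.length + 1) false) v1 true).length = L := by
    rw [hA]; simp [hL]
  have hV0eq : V0 = ((List.replicate (graph.length + 1) false).set (pvCell L v1) true).set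
      (pvCell L v2) true := by
    rw [hV0def]
    have h2 := pySetD_cell (V := PySem.List.pySetD (List.replicate (graph.length + 1) false) v1 true)
      (x := v2) true (by rw [hAlen]; exact h2r)
    rw [hAlen] at h2
    rw [h2, hA]
  have hlen0 : V0.length = L := by rw [hV0eq]; simp [hL]
  have hc1lt : pvCell L v1 < L := (pyIdx?_inRange h1r).2
  have hc2lt : pvCell L v2 < L := (pyIdx?_inRange h2r).2
  have hV0v1 : V0.getD (pvCell L v1) false = true := by
    rw [hV0eq]
    by_cases h : pvCell L v2 = pvCell L v1
    · rw [h]; exact getD_set_self (by simp; omega)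
    · rw [getD_set_ne h]; exact getD_set_self (by simp; omega)
  have hV0v2 : V0.getD (pvCell L v2) false = true := by
    rw [hV0eq]; exact getD_set_self (by simp; omega)
  have hreachE : ∀ n : Int, pvReach graph V0 v1 n → n ∈ pvE graph v1 v2 L :=
    reach_Emem graph v1 v2 L V0 hlen0 hV0v1 hV0v2
  have HTv : ∀ u n, pvTouched graph V0 v1 u → n ∈ pvAdj graph u →
      PySem.Raise.InRange L n := by
    intro u n hu hn
    rcases hu with rfl | hu
    · exact hv1adj n hn
    · exact (hEprop u (hreachE u hu)).2 n hn
  have NC : ∀ x y, pvReach graph V0 v1 x → pvReach graph V0 v1 y →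
      pvCell L x = pvCell L y → x = y := by
    intro x y hx hy hc
    exact hNC x (hreachE x hx) y (hreachE y hy) hc
  have hfc0 : falseCount V0 < graph.length + 2 := by
    unfold falseCount; rw [hlen0]; omega
  obtain ⟨g1, g2, g3, g4, g5, g6⟩ := dfsGo_spec graph L v1 V0 hlen0 HTv NC
    (graph.length + 2) V0 v1 hlen0 hfc0 (pvLe_refl V0) (Or.inl rfl)
  set VF := (dfsGo graph (graph.length + 2) V0 v1).1 with hVF
  have HFlen : VF.length = L := by rw [g1, hlen0]
  have hcomplete : ∀ m : Int, pvReach graph V0 v1 m → VF.getD (pvCell L m) false = true := by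
    intro m hm
    induction hm with
    | base hmem _ => exact g5 _ hmem
    | @step m' n' hr hmem hunv ih =>
      rcases g6 m' hr ih with h | h
      · have h0 := (getD_of_pyGet? (pvReach_unvisited hr)).2.2
        rw [hlen0] at h0
        rw [h0] at h; exact Bool.noConfusion h
      · exact h _ hmem
  have HFchar : ∀ j : Nat, j < L → (VF.getD j false = true ↔
      V0.getD j false = true ∨ ∃ m, pvReach graph V0 v1 m ∧ pvCell L m = j) := by
    intro j hj
    constructor
    · exact g4 j hj
    · rintro (h | ⟨m, hm, hmc⟩)
      · exact g2 j h
      · rw [← hmc]; exact hcomplete m hm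
  have hinv0 : pvInv graph L v1 V0 V0 [v1] 1 := by
    refine ⟨hlen0, pvLe_refl V0, fun j _ h => Or.inl h, ?_, List.nodup_singleton _, ?_, ?_, by ring⟩
    · intro u hu; rcases List.mem_singleton.mp hu with rfl
      exact ⟨hV0v1, Or.inl rfl⟩
    · intro u hu humark _
      exfalso
      have h0 := (getD_of_pyGet? (pvReach_unvisited hu)).2.2
      rw [hlen0] at h0
      rw [humark] at h0; exact Bool.noConfusion h0
    · intro h; exact absurd (List.mem_singleton.mpr rfl) h
  have hfcq : falseCount V0 + ([v1] : List Int).length < graph.length + 3 := by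
    have : falseCount V0 ≤ L := by unfold falseCount; omega
    simp only [List.length_singleton]
    omega
  have hmain := bfsLoop_spec graph L v1 V0 VF hlen0 HTv NC HFlen HFchar
    (graph.length + 3) V0 [v1] 1 hinv0 hfcq
  rw [hmain]
  exact g3.symm
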